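-- pv_equiv track=rewrite | github.com/HugoDurandMermet/public | memoryMonitor.py | findAppropriateMultiplier
-- ===== SOURCE A (Python) =====
-- def findAppropriateMultiplier(number):
--     temporaryMultList = []
--     rangeList = list(range(1,number))
--     for i in rangeList:
--         if number % i ==0:
--             temporaryMultList.append(i)
--     if len(temporaryMultList) <= 3:
--         return temporaryMultList[-1]
--     else:
--         return temporaryMultList[-2]
-- ===== SOURCE B (Python) =====
-- def findAppropriateMultiplier(number):
--     small = []
--     large = []
--     i = 1
--     while i * i <= number:
--         if number % i == 0:
--             small.append(i)
--             j = number // i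
--             if j != i:
--                 large.append(j)
--         i += 1
--     divisors = small + large[::-1]
--     proper = divisors[:-1]
--     if len(proper) <= 3:
--         return proper[-1]
--     else:
--         return proper[-2]
-- ===== Notes on version B (the rewrite author's own statement) =====
-- stated objective: faster
-- what changed: B enumerates divisors only up to sqrt(n), pairing each small divisor d with its cofactor n//d to reconstruct the full ascending divisor list, instead of A's full scan of 1..n-1.
import Mathlib
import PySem

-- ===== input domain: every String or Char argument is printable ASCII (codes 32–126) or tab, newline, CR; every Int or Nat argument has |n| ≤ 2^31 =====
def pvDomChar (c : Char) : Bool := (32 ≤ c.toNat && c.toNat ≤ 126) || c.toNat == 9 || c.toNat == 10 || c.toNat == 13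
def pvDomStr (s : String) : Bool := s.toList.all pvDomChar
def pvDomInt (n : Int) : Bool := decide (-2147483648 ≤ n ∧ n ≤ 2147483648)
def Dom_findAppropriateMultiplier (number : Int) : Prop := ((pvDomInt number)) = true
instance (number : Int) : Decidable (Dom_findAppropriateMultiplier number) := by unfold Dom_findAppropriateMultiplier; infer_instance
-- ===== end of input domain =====

-- B replaces A's scan of 1..n-1 by the divisor-pairing enumeration up to √n (objective: faster).

-- ===== PORT A =====
def findAppropriateMultiplier (number : Int) : Int :=
  let temporaryMultList : List Int :=
    (PySem.List.pyRange 1 number 1).foldl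
      (fun acc i => if PySem.Int.mod number i == 0 then acc ++ [i] else acc) []
  if temporaryMultList.length ≤ 3 then
    (PySem.List.pyGet? temporaryMultList (-1)).getD 0
  else
    (PySem.List.pyGet? temporaryMultList (-2)).getD 0

-- ===== PORT B =====
-- while i * i <= number: collect small divisors i and their cofactors number // i
def pvLoopB (number i : Int) (small large : List Int) : List Int × List Int :=
  if h : i * i ≤ number then
    if PySem.Int.mod number i == 0 then
      let j := PySem.Int.floordiv number i
      pvLoopB number (i + 1) (small ++ [i]) (if j ≠ i then large ++ [j] else large)
    else
      pvLoopB number (i + 1) small large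
  else (small, large)
termination_by (number + 1 - i).toNat
decreasing_by
  all_goals
    (have h2 : 2 * number ≥ 2 * i - 1 := by nlinarith [sq_nonneg (i - 1), sq_nonneg i]
     omega)

def findAppropriateMultiplier_alt (number : Int) : Int :=
  let p := pvLoopB number 1 [] []
  let divisors := p.1 ++ (PySem.List.slice? p.2 none none (-1)).getD []
  let proper := PySem.List.slice divisors none (some (-1))
  if proper.length ≤ 3 then
    (PySem.List.pyGet? proper (-1)).getD 0
  else
    (PySem.List.pyGet? proper (-2)).getD 0

-- ===== PRECONDITION & SPEC =====
-- A raises IndexError (empty divisor list) exactly when number ≤ 1; B raises there too.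
def Pre_findAppropriateMultiplier (number : Int) : Prop := 2 ≤ number
instance (number : Int) : Decidable (Pre_findAppropriateMultiplier number) := by unfold Pre_findAppropriateMultiplier; infer_instance
def pvWitness_findAppropriateMultiplier : Int := (12)

def Spec_findAppropriateMultiplier (number : Int) (out : Int) : Prop := out = findAppropriateMultiplier_alt number
instance (number : Int) (out : Int) : Decidable (Spec_findAppropriateMultiplier number out) := by unfold Spec_findAppropriateMultiplier; infer_instance

-- ===== CLAIM (what is proved, stated in full; the proofs are below) =====
def Claim_equal_findAppropriateMultiplier : Prop := ∀ (number : Int), Dom_findAppropriateMultiplier number → Pre_findAppropriateMultiplier number → Spec_findAppropriateMultiplier number (findAppropriateMultiplier number)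

-- ===== LEMMAS AND PROOFS =====

-- Bool predicates: d is a divisor / a small divisor whose cofactor differs from it
def pvP (n d : Int) : Bool := PySem.Int.mod n d == 0
def pvQ (n d : Int) : Bool := pvP n d && decide (PySem.Int.floordiv n d ≠ d)

theorem pvP_iff (n d : Int) : pvP n d = true ↔ d ∣ n := by
  simp [pvP, PySem.Int.mod_eq_zero_iff_dvd]

theorem pvDiv_mul (n d : Int) (hd : 1 ≤ d) (h : d ∣ n) : PySem.Int.floordiv n d * d = n := by
  rw [PySem.Int.floordiv_eq_ediv_of_pos (by omega)]
  exact Int.ediv_mul_cancel h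

theorem pvDiv_pos (n d : Int) (hn : 2 ≤ n) (hd : 1 ≤ d) (h : d ∣ n) : 1 ≤ PySem.Int.floordiv n d := by
  have := pvDiv_mul n d hd h
  nlinarith [this]

theorem pvAntitone (n a b : Int) (hn : 2 ≤ n) (ha : 1 ≤ a) (hb : 1 ≤ b) (hab : a < b)
    (da : a ∣ n) (db : b ∣ n) : PySem.Int.floordiv n b < PySem.Int.floordiv n a := by
  have h1 := pvDiv_mul n a ha da
  have h2 := pvDiv_mul n b hb db
  have h3 := pvDiv_pos n b hn hb db
  nlinarith

-- two strictly increasing integer lists with the same members are equal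
theorem pvEqOfMem (l1 l2 : List Int) (h1 : l1.Nodup) (h2 : l2.Nodup) (h : ∀ x, x ∈ l1 ↔ x ∈ l2)
    (s1 : l1.Pairwise (· < ·)) (s2 : l2.Pairwise (· < ·)) : l1 = l2 := by
  have hp : l1.Perm l2 := (List.perm_ext_iff_of_nodup h1 h2).mpr h
  exact hp.eq_of_pairwise (fun a b _ _ hab hba => le_antisymm hab hba) (s1.imp le_of_lt) (s2.imp le_of_lt)

-- closed form of B's loop: filters over the remaining candidate range i..t
theorem pvLoopB_eq (n t : Int) (ht1 : 1 ≤ t) (hts : t * t ≤ n) (htn : n < (t + 1) * (t + 1)) :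
    ∀ (k : Nat) (i : Int) (small large : List Int), 1 ≤ i → (t + 1 - i).toNat = k →
      pvLoopB n i small large =
        (small ++ (PySem.List.pyRange i (t + 1) 1).filter (pvP n),
         large ++ ((PySem.List.pyRange i (t + 1) 1).filter (pvQ n)).map (fun d => PySem.Int.floordiv n d)) := by
  intro k
  induction k with
  | zero =>
    intro i small large hi hk
    have hit : t + 1 ≤ i := by omega
    have hcond : ¬ i * i ≤ n := by nlinarith
    rw [pvLoopB, dif_neg hcond, PySem.List.pyRange_one_eq_nil (by omega)]
    simp
  | succ k ih =>
    intro i small large hi hk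
    have hit : i ≤ t := by omega
    have hcond : i * i ≤ n := by nlinarith
    rw [pvLoopB, dif_pos hcond, PySem.List.pyRange_one_cons (by omega), List.filter_cons, List.filter_cons]
    by_cases hm : PySem.Int.mod n i == 0
    · rw [if_pos hm]
      have hP : pvP n i = true := hm
      rw [ih (i + 1) _ _ (by omega) (by omega)]
      by_cases hj : PySem.Int.floordiv n i ≠ i
      · have hQ : pvQ n i = true := by simp [pvQ, hP, hj]
        simp [hj, hP, hQ]
      · have hQ : pvQ n i = false := by simp [pvQ, hj]
        simp [hj, hP, hQ]
    · rw [if_neg hm]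
      have hP : pvP n i = false := by simpa [pvP] using hm
      have hQ : pvQ n i = false := by simp [pvQ, hP]
      rw [ih (i + 1) _ _ (by omega) (by omega)]
      simp [hP, hQ]

-- the reversed cofactor list is exactly the ascending list of the divisors above t
theorem pvLarge_reverse (n t : Int) (hn : 2 ≤ n) (ht1 : 1 ≤ t) (hts : t * t ≤ n) (htn : n < (t + 1) * (t + 1)) :
    (((PySem.List.pyRange 1 (t + 1) 1).filter (pvQ n)).map (fun d => PySem.Int.floordiv n d)).reverse
      = (PySem.List.pyRange (t + 1) (n + 1) 1).filter (pvP n) := by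
  have hQmem : ∀ d ∈ (PySem.List.pyRange 1 (t + 1) 1).filter (pvQ n),
      1 ≤ d ∧ d ≤ t ∧ d ∣ n ∧ PySem.Int.floordiv n d ≠ d := by
    intro d hd
    rw [List.mem_filter, PySem.List.mem_pyRange_one] at hd
    obtain ⟨⟨h1, h2⟩, hq⟩ := hd
    simp only [pvQ, Bool.and_eq_true, decide_eq_true_eq] at hq
    exact ⟨h1, by omega, (pvP_iff n d).1 hq.1, hq.2⟩
  have s1 : ((((PySem.List.pyRange 1 (t + 1) 1).filter (pvQ n)).map (fun d => PySem.Int.floordiv n d)).reverse).Pairwise (· < ·) := by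
    rw [List.pairwise_reverse, List.pairwise_map]
    have base : ((PySem.List.pyRange 1 (t + 1) 1).filter (pvQ n)).Pairwise (· < ·) :=
      (PySem.List.pairwise_lt_pyRange_one 1 (t + 1)).filter _
    refine List.Pairwise.imp_of_mem ?_ base
    intro a b ha hb hab
    obtain ⟨ha1, _, hda, _⟩ := hQmem a ha
    obtain ⟨hb1, _, hdb, _⟩ := hQmem b hb
    exact pvAntitone n a b hn ha1 hb1 hab hda hdb
  have s2 : (((PySem.List.pyRange (t + 1) (n + 1) 1).filter (pvP n))).Pairwise (· < ·) :=
    (PySem.List.pairwise_lt_pyRange_one (t + 1) (n + 1)).filter _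
  refine pvEqOfMem _ _ (s1.imp ne_of_lt) (s2.imp ne_of_lt) ?_ s1 s2
  intro x
  simp only [List.mem_reverse, List.mem_map, List.mem_filter, PySem.List.mem_pyRange_one]
  constructor
  · rintro ⟨d, ⟨⟨hd1, hd2⟩, hq⟩, rfl⟩
    simp only [pvQ, Bool.and_eq_true, decide_eq_true_eq] at hq
    have hdvd := (pvP_iff n d).1 hq.1
    have hxd : PySem.Int.floordiv n d * d = n := pvDiv_mul n d hd1 hdvd
    have hx1 : 1 ≤ PySem.Int.floordiv n d := pvDiv_pos n d hn hd1 hdvd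
    set x := PySem.Int.floordiv n d with hxdef
    have hxn : x ≤ n := by nlinarith
    have hxt : t + 1 ≤ x := by
      by_contra hcon
      rw [not_le] at hcon
      have hxle : x ≤ t := by omega
      have hdle : d ≤ t := by omega
      have h1 : x * d = t * t := by nlinarith
      have hdt : d = t := by nlinarith
      have hxt' : x = t := by nlinarith
      exact hq.2 (by omega)
    refine ⟨⟨hxt, by omega⟩, (pvP_iff n x).2 ⟨d, hxd.symm⟩⟩
  · rintro ⟨⟨hx1, hx2⟩, hp⟩
    have hxdvd := (pvP_iff n x).1 hp
    have hx1' : 1 ≤ x := by omega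
    have hdx : PySem.Int.floordiv n x * x = n := pvDiv_mul n x hx1' hxdvd
    set d := PySem.Int.floordiv n x with hddef
    have hd1 : 1 ≤ d := pvDiv_pos n x hn hx1' hxdvd
    have hdt : d ≤ t := by nlinarith
    have hddvd : d ∣ n := ⟨x, hdx.symm⟩
    have hback : PySem.Int.floordiv n d = x := by
      rw [PySem.Int.floordiv_eq_ediv_of_pos (by omega)]
      rw [show n = d * x by omega]
      exact Int.mul_ediv_cancel_left x (by omega)
    refine ⟨d, ⟨⟨hd1, by omega⟩, ?_⟩, hback⟩
    simp only [pvQ, Bool.and_eq_true, decide_eq_true_eq]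
    exact ⟨(pvP_iff n d).2 hddvd, by omega⟩

theorem pvMain : ∀ (number : Int), 2 ≤ number →
    findAppropriateMultiplier number = findAppropriateMultiplier_alt number := by
  intro number hn
  set t : Int := (Nat.sqrt number.toNat : Int) with htdef
  have hnn : ((number.toNat : Int)) = number := Int.toNat_of_nonneg (by omega)
  have ht1 : (1:Int) ≤ t := by
    have := Nat.sqrt_pos.2 (by omega : 0 < number.toNat)
    omega
  have hts : t * t ≤ number := by
    have h := Nat.sqrt_le' number.toNat
    have h2 : (Nat.sqrt number.toNat : Int) * (Nat.sqrt number.toNat : Int) ≤ (number.toNat : Int) := by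
      have := (Int.ofNat_le.2 h)
      push_cast at this
      nlinarith
    rw [htdef]
    rwa [hnn] at h2
  have htn : number < (t + 1) * (t + 1) := by
    have h := Nat.lt_succ_sqrt' number.toNat
    have h2 : (number.toNat : Int) < ((Nat.sqrt number.toNat : Int) + 1) * ((Nat.sqrt number.toNat : Int) + 1) := by
      have := (Int.ofNat_lt.2 h)
      push_cast [Nat.succ_eq_add_one] at this
      nlinarith
    rw [htdef]
    rwa [hnn] at h2
  have hloop := pvLoopB_eq number t ht1 hts htn (t + 1 - 1).toNat 1 [] [] (le_refl 1) rfl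
  have hPn : pvP number number = true := (pvP_iff number number).2 dvd_rfl
  have hsplit : PySem.List.pyRange 1 (number + 1) 1
      = PySem.List.pyRange 1 (t + 1) 1 ++ PySem.List.pyRange (t + 1) (number + 1) 1 :=
    PySem.List.pyRange_one_append 1 (t + 1) (number + 1) (by omega) (by nlinarith)
  have hsucc : PySem.List.pyRange 1 (number + 1) 1
      = PySem.List.pyRange 1 number 1 ++ [number] :=
    PySem.List.pyRange_one_succ_right (by omega)
  unfold findAppropriateMultiplier findAppropriateMultiplier_alt
  rw [hloop]
  simp only [List.nil_append, PySem.List.slice?_none_none_neg_one, Option.getD_some]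
  rw [pvLarge_reverse number t hn ht1 hts htn, ← List.filter_append, ← hsplit, hsucc,
    List.filter_append, PySem.List.foldl_append_if_eq_filter, List.nil_append]
  have hfeq : (fun i => PySem.Int.mod number i == 0) = pvP number := rfl
  rw [hfeq]
  simp only [List.filter_cons, List.filter_nil, hPn, if_true, PySem.List.slice_to_neg_one,
    List.dropLast_concat]

-- ===== VERDICT (by name: the statement is the Claim_ definition above) =====
theorem findAppropriateMultiplier_spec : Claim_equal_findAppropriateMultiplier := by
  intro number _ hpre
  exact pvMain number hpre
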